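-- pv_equiv track=rewrite | github.com/viethq18/kalapa_vmqa_solution | utils.py | litm_reordering
-- ===== SOURCE A (Python) =====
-- def litm_reordering(documents):
--     """Los in the middle reorder: the most relevant will be at the
--     middle of the list and more relevant elements at beginning / end.
--     See: https://arxiv.org/abs//2307.03172"""
--
--     tmp_documents = list(reversed(documents))
--     reordered_result = []
--     for i, value in enumerate(tmp_documents):
--         if i % 2 == 1:
--             reordered_result.append(value)
--         else:
--             reordered_result.insert(0, value)
--     return reordered_result
-- ===== SOURCE B (Python) =====
-- def litm_reordering(documents):
--     """Lost-in-the-middle reorder, slice-based: reverse once, then the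
--     even-indexed elements (reversed) form the front and the odd-indexed
--     elements the back -- no per-element loop or insert(0, ...)."""
--     r = list(reversed(documents))
--     return r[::2][::-1] + r[1::2]
-- ===== Notes on version B (the rewrite author's own statement) =====
-- stated objective: simpler
-- what changed: Replaces the element-by-element loop with alternating append/insert(0) by three slices of the reversed list: evens reversed form the front half, odds the back half.
import Mathlib
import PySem

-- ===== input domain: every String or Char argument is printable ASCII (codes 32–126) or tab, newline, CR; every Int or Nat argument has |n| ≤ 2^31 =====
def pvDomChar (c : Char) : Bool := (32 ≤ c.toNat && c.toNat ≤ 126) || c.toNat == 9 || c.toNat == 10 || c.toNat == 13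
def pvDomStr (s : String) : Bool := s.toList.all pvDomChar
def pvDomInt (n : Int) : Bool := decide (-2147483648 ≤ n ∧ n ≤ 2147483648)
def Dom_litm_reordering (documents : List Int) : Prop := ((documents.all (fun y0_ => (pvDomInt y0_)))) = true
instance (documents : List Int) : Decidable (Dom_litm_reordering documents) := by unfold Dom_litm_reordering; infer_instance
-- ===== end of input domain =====

-- B replaces A's per-element loop (alternating append / insert-at-0) by three slices of
-- the reversed list; objective: simpler.

-- ===== PORT A =====
-- tmp_documents = list(reversed(documents)); loop over enumerate with
-- append (odd index) / insert(0, value) (even index).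
def litm_reordering (documents : List Int) : List Int :=
  let tmp_documents := documents.reverse
  (PySem.List.enumerate tmp_documents 0).foldl
    (fun reordered_result iv =>
      if PySem.Int.mod iv.1 2 == 1 then reordered_result ++ [iv.2]
      else iv.2 :: reordered_result) []

-- ===== PORT B =====
-- r = list(reversed(documents)); return r[::2][::-1] + r[1::2]
def litm_reordering_alt (documents : List Int) : List Int :=
  let r := documents.reverse
  (PySem.List.slice? ((PySem.List.slice? r none none 2).getD []) none none (-1)).getD []
    ++ (PySem.List.slice? r (some 1) none 2).getD []

-- ===== PRECONDITION & SPEC =====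
def Spec_litm_reordering (documents : List Int) (out : List Int) : Prop := out = litm_reordering_alt documents
instance (documents : List Int) (out : List Int) : Decidable (Spec_litm_reordering documents out) := by unfold Spec_litm_reordering; infer_instance

-- ===== CLAIM (what is proved, stated in full; the proofs are below) =====
def Claim_equal_litm_reordering : Prop := ∀ (documents : List Int), Dom_litm_reordering documents → Spec_litm_reordering documents (litm_reordering documents)

-- ===== LEMMAS AND PROOFS =====

/-- The even-indexed elements of a list. -/
def pvEvens : List Int → List Int
  | [] => []
  | [x] => [x]
  | x :: _ :: xs => x :: pvEvens xs

/-- A's loop, run from any even start index `2*t`, prepends the reversed evens of the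
remaining list to `acc` and appends its odds. -/
theorem pvLoop (l : List Int) : ∀ (t : Nat) (acc : List Int),
    (PySem.List.enumerate l (2 * (t : Int))).foldl
      (fun reordered_result iv =>
        if PySem.Int.mod iv.1 2 == 1 then reordered_result ++ [iv.2]
        else iv.2 :: reordered_result) acc
    = (pvEvens l).reverse ++ acc ++ pvEvens l.tail := by
  match l with
  | [] => intro t acc; simp [PySem.List.enumerate, pvEvens]
  | [x] =>
    intro t acc
    have h0 : PySem.Int.mod (2 * (t : Int)) 2 = 0 := by
      simp [PySem.Int.mod]
    simp only [PySem.List.enumerate_cons, PySem.List.enumerate_nil, List.foldl_cons,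
      List.foldl_nil, h0]
    norm_num [pvEvens]
  | x :: y :: rest =>
    intro t acc
    have h0 : PySem.Int.mod (2 * (t : Int)) 2 = 0 := by
      simp [PySem.Int.mod]
    have h1 : PySem.Int.mod (2 * (t : Int) + 1) 2 = 1 := by
      simp [PySem.Int.mod]
    have hs : (2 * (t : Int) + 1 + 1) = 2 * ((t + 1 : Nat) : Int) := by push_cast; ring
    have ih := pvLoop rest (t + 1) (x :: acc ++ [y])
    push_cast at ih
    simp only [PySem.List.enumerate_cons, List.foldl_cons, h0, h1, hs]
    push_cast
    norm_num at ih ⊢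
    rw [ih]
    cases rest <;> simp [pvEvens]
termination_by l.length

/-- filterMap of the even indices over `range ((n+1)/2)` is exactly the evens. -/
theorem pvFM (xs : List Int) :
    List.filterMap (fun k : Nat => xs[2 * k]?) (List.range ((xs.length + 1) / 2))
      = pvEvens xs := by
  match xs with
  | [] => simp [pvEvens]
  | x :: ys =>
    have hm : ((x :: ys).length + 1) / 2 = ys.length / 2 + 1 := by
      simp only [List.length_cons]; omega
    have hrec := pvFM ys.tail
    have hlen : (ys.tail.length + 1) / 2 = ys.length / 2 := by
      cases ys
      · simp
      · simp only [List.tail_cons, List.length_cons]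
    rw [hm, List.range_succ_eq_map, List.filterMap_cons, List.filterMap_map]
    simp only [Nat.mul_zero, List.getElem?_cons_zero]
    have harg : (fun k : Nat => (x :: ys)[2 * (k + 1)]?) = fun k : Nat => ys.tail[2 * k]? := by
      funext k
      have h2 : 2 * (k + 1) = (2 * k + 1) + 1 := by omega
      rw [h2, List.getElem?_cons_succ, ← List.getElem?_tail]
    rw [show ((fun k : Nat => (x :: ys)[2 * k]?) ∘ (fun k => k + 1))
          = fun k : Nat => (x :: ys)[2 * (k + 1)]? from rfl, harg, ← hlen, hrec]
    cases ys <;> simp [pvEvens]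
termination_by xs.length

/-- `xs[::2]` is the even-indexed elements. -/
theorem pvSliceEvens (xs : List Int) :
    PySem.List.slice? xs none none 2 = some (pvEvens xs) := by
  have h2 : (2 : Int) ≠ 0 := by omega
  simp only [PySem.List.slice?, PySem.List.sliceIndices, if_neg h2]
  norm_num
  have hc : (if 0 < xs.length then (((xs.length : Int) + 2 - 1) / 2).toNat else 0)
      = (xs.length + 1) / 2 := by
    split_ifs with h <;> omega
  have hi : (fun k : Nat => xs[(2 * (k : Int)).toNat]?) = fun k : Nat => xs[2 * k]? := by
    funext k
    have hk : ((2 : Int) * (k : Int)).toNat = 2 * k := by omega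
    rw [hk]
  rw [hc, hi, pvFM]

/-- `xs[1::2]` is the odd-indexed elements. -/
theorem pvSliceOdds (xs : List Int) :
    PySem.List.slice? xs (some 1) none 2 = some (pvEvens xs.tail) := by
  have h2 : (2 : Int) ≠ 0 := by omega
  cases xs with
  | nil => decide
  | cons x ys =>
    simp only [PySem.List.slice?, PySem.List.sliceIndices, if_neg h2]
    norm_num
    have hc : (if 0 < ys.length then (((ys.length : Int) + 2 - 1) / 2).toNat else 0)
        = (ys.length + 1) / 2 := by
      split_ifs with h <;> omega
    have hi : (fun k : Nat => (x :: ys)[((1 : Int) + 2 * (k : Int)).toNat]?)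
        = fun k : Nat => ys[2 * k]? := by
      funext k
      have hk : ((1 : Int) + 2 * (k : Int)).toNat = (2 * k) + 1 := by omega
      rw [hk, List.getElem?_cons_succ]
    rw [hc, hi, pvFM]

-- ===== VERDICT (by name: the statement is the Claim_ definition above) =====
theorem litm_reordering_spec : Claim_equal_litm_reordering := by
  intro documents _
  unfold Spec_litm_reordering litm_reordering litm_reordering_alt
  simp only [pvSliceEvens, pvSliceOdds, Option.getD_some,
    PySem.List.slice?_none_none_neg_one]
  have := pvLoop documents.reverse 0 []
  simpa using this
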